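-- pv_equiv track=rewrite | github.com/Matteo-Candi/Master-Thesis | benchmark/Python_formatted.py | find_min_operations_req_emp_str
-- ===== SOURCE A (Python) =====
-- def find_min_operations_req_emp_str(s):
--     cnt_one = 0
--     cnt_zero = 0
--     n = len(s)
--     for i in range(n):
--         if s[i] == '0':
--             if cnt_one > 0:
--                 cnt_one = cnt_one - 1
--             cnt_zero = cnt_zero + 1
--         else:
--             if cnt_zero > 0:
--                 cnt_zero = cnt_zero - 1
--             cnt_one = cnt_one + 1
--     return cnt_one + cnt_zero
-- ===== SOURCE B (Python) =====
-- def find_min_operations_req_emp_str(s):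
--     cur = lo = hi = 0
--     for c in s:
--         cur += 1 if c == '0' else -1
--         if cur < lo:
--             lo = cur
--         if cur > hi:
--             hi = cur
--     return hi - lo
-- ===== Notes on version B (the rewrite author's own statement) =====
-- stated objective: simpler
-- what changed: Replaced the two mutually-cancelling counters by one running prefix sum (+1 for '0', -1 otherwise) whose max-minus-min over all prefixes equals A's result.
import Mathlib
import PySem

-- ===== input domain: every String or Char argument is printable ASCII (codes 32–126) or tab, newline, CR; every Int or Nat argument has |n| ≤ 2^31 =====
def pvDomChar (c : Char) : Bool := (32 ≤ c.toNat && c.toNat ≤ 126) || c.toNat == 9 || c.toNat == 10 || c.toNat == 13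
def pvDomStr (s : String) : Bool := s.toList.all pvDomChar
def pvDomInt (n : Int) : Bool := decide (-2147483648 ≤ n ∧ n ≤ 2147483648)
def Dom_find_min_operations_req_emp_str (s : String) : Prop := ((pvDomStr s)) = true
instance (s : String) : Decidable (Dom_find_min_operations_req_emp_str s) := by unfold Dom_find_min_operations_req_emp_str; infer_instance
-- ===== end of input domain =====

-- B replaces A's two mutually-cancelling counters by a single prefix-sum walk with running min/max (simpler state, same O(n) cost).


-- ===== PORT A =====
-- state (cnt_one, cnt_zero); loop body of A, step for step
def pvStepA (st : Int × Int) (c : Char) : Int × Int :=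
  if c = '0' then
    ((if st.1 > 0 then st.1 - 1 else st.1), st.2 + 1)
  else
    (st.1 + 1, (if st.2 > 0 then st.2 - 1 else st.2))

def find_min_operations_req_emp_str (s : String) : Int :=
  let n := PySem.Str.len s
  let st := (PySem.List.pyRange 0 n 1).foldl
    (fun st i => pvStepA st (PySem.List.pyGetD s.toList i ' ')) ((0 : Int), (0 : Int))
  st.1 + st.2

-- ===== PORT B =====
-- state (cur, lo, hi); loop body of B, step for step
def pvStepB (st : Int × Int × Int) (c : Char) : Int × Int × Int :=
  let cur := st.1 + (if c = '0' then 1 else -1)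
  (cur, (if cur < st.2.1 then cur else st.2.1), (if cur > st.2.2 then cur else st.2.2))

def find_min_operations_req_emp_str_alt (s : String) : Int :=
  let t := s.toList.foldl pvStepB ((0 : Int), (0 : Int), (0 : Int))
  t.2.2 - t.2.1

-- ===== PRECONDITION & SPEC =====
def Spec_find_min_operations_req_emp_str (s : String) (out : Int) : Prop := out = find_min_operations_req_emp_str_alt s
instance (s : String) (out : Int) : Decidable (Spec_find_min_operations_req_emp_str s out) := by unfold Spec_find_min_operations_req_emp_str; infer_instance

-- ===== CLAIM (what is proved, stated in full; the proofs are below) =====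
def Claim_equal_find_min_operations_req_emp_str : Prop := ∀ (s : String), Dom_find_min_operations_req_emp_str s → Spec_find_min_operations_req_emp_str s (find_min_operations_req_emp_str s)

-- ===== LEMMAS AND PROOFS =====

-- Invariant linking the two loops: A's counters are (hi - cur, cur - lo) of B's walk.
lemma pv_link (l : List Char) : ∀ (cur lo hi : Int), lo ≤ cur → cur ≤ hi →
    l.foldl pvStepA (hi - cur, cur - lo)
      = ((l.foldl pvStepB (cur, lo, hi)).2.2 - (l.foldl pvStepB (cur, lo, hi)).1,
         (l.foldl pvStepB (cur, lo, hi)).1 - (l.foldl pvStepB (cur, lo, hi)).2.1)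
    ∧ (l.foldl pvStepB (cur, lo, hi)).2.1 ≤ (l.foldl pvStepB (cur, lo, hi)).1
    ∧ (l.foldl pvStepB (cur, lo, hi)).1 ≤ (l.foldl pvStepB (cur, lo, hi)).2.2 := by
  induction l with
  | nil => intro cur lo hi h1 h2; exact ⟨rfl, h1, h2⟩
  | cons c l ih =>
    intro cur lo hi h1 h2
    simp only [List.foldl_cons]
    by_cases hc : c = '0'
    · have e1 : pvStepA (hi - cur, cur - lo) c
          = (hi - (cur + 1) + (if cur + 1 > hi then cur + 1 - hi else 0),
             (cur + 1) - (if cur + 1 < lo then cur + 1 else lo)) := by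
        simp only [pvStepA, hc]; split_ifs <;> simp_all <;> omega
      have e2 : pvStepB (cur, lo, hi) c
          = (cur + 1, (if cur + 1 < lo then cur + 1 else lo), (if cur + 1 > hi then cur + 1 else hi)) := by
        simp [pvStepB, hc]
      rw [e1, e2]
      have h3 : (if cur + 1 < lo then cur + 1 else lo) ≤ cur + 1 := by split_ifs <;> omega
      have h4 : cur + 1 ≤ (if cur + 1 > hi then cur + 1 else hi) := by split_ifs <;> omega
      have := ih (cur + 1) (if cur + 1 < lo then cur + 1 else lo) (if cur + 1 > hi then cur + 1 else hi) h3 h4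
      have e3 : (if cur + 1 > hi then cur + 1 else hi) - (cur + 1)
          = hi - (cur + 1) + (if cur + 1 > hi then cur + 1 - hi else 0) := by split_ifs <;> omega
      rw [e3] at this; exact this
    · have e1 : pvStepA (hi - cur, cur - lo) c
          = (hi - (cur - 1) + (if cur - 1 > hi then cur - 1 - hi else 0),
             (cur - 1) - (if cur - 1 < lo then cur - 1 else lo)) := by
        simp only [pvStepA, hc]; split_ifs <;> simp_all <;> omega
      have e2 : pvStepB (cur, lo, hi) c
          = (cur - 1, (if cur - 1 < lo then cur - 1 else lo), (if cur - 1 > hi then cur - 1 else hi)) := by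
        simp [pvStepB, hc]; omega
      rw [e1, e2]
      have h3 : (if cur - 1 < lo then cur - 1 else lo) ≤ cur - 1 := by split_ifs <;> omega
      have h4 : cur - 1 ≤ (if cur - 1 > hi then cur - 1 else hi) := by split_ifs <;> omega
      have := ih (cur - 1) (if cur - 1 < lo then cur - 1 else lo) (if cur - 1 > hi then cur - 1 else hi) h3 h4
      have e3 : (if cur - 1 > hi then cur - 1 else hi) - (cur - 1)
          = hi - (cur - 1) + (if cur - 1 > hi then cur - 1 - hi else 0) := by split_ifs <;> omega
      rw [e3] at this; exact this

-- ===== VERDICT (by name: the statement is the Claim_ definition above) =====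
theorem find_min_operations_req_emp_str_spec : Claim_equal_find_min_operations_req_emp_str := by
  intro s _
  unfold Spec_find_min_operations_req_emp_str find_min_operations_req_emp_str find_min_operations_req_emp_str_alt
  simp only [PySem.Str.len_eq]
  rw [PySem.List.foldl_pyRange_zero_pyGetD' s.toList ' ' pvStepA ((0 : Int), (0 : Int))]
  have h := pv_link s.toList 0 0 0 (le_refl 0) (le_refl 0)
  obtain ⟨h1, -, -⟩ := h
  simp only [show (0 : Int) - 0 = 0 from rfl] at h1
  rw [h1]
  omega
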